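-- pv_equiv track=rewrite | github.com/AdamObrzut1912/prg-basics | 04-Functions/7-19.py | f
-- ===== SOURCE A (Python) =====
-- def f(number):
--     lista = {}
--     number_str = str(number)
--     suma = 0
--
--     for i in number_str:
--
--         if i in lista.keys():
--             lista[i] += 1
--         else:
--             lista[i] = 1
--
--     for klucz, wartosc in lista.items():
--             if wartosc > 1:
--                 suma = suma + int(klucz)*wartosc
--             else:
--                 continue
--
--
--     return suma
-- ===== SOURCE B (Python) =====
-- def f(number):
--     s = sorted(str(number))
--     total = 0
--     i = 0
--     n = len(s)
--     while i < n:
--         j = i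
--         while j < n and s[j] == s[i]:
--             j += 1
--         if j - i > 1:
--             total += int(s[i]) * (j - i)
--         i = j
--     return total
-- ===== Notes on version B (the rewrite author's own statement) =====
-- stated objective: alternative
-- what changed: B replaces A's frequency-dictionary pass over str(number) by sorting the characters and scanning consecutive equal runs with a two-index while loop, adding int(digit)*run_length for runs longer than 1.
import Mathlib
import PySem

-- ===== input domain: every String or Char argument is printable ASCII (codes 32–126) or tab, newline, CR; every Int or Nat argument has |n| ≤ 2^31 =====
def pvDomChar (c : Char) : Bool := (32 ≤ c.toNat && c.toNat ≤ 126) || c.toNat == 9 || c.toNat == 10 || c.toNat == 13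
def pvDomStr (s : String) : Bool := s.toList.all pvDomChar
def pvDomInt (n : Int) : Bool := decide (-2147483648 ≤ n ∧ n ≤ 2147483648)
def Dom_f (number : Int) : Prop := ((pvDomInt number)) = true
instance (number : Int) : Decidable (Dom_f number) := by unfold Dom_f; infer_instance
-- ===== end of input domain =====

-- B replaces A's frequency dictionary by sorting the digits and scanning consecutive runs (alternative decomposition, same cost class).

-- ===== PORT A =====
-- int(klucz) is ported as (ofChars? [klucz]).getD 0; the branch is only reached when the
-- character occurs more than once in str(number), i.e. klucz is a digit, so int() never raises
-- and the .getD 0 default is unreachable.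
def f (number : Int) : Int :=
  let number_str := PySem.Int.toChars number
  let lista := number_str.foldl
    (fun d i => if d.contains i then d.modify i 0 (fun v => v + 1) else d.insert i 1)
    PySem.Dict.empty
  lista.items.foldl
    (fun suma kv => if kv.2 > 1 then suma + (PySem.Int.ofChars? [kv.1]).getD 0 * kv.2 else suma)
    0

-- ===== PORT B =====
-- the outer while-loop of Source B: consume one run of equal characters, add its contribution, recurse
def runsSum : List Char → Int
  | [] => 0
  | c :: rest =>
      let run := rest.takeWhile (fun x => x == c)
      let cnt : Int := (run.length : Int) + 1
      (if cnt > 1 then (PySem.Int.ofChars? [c]).getD 0 * cnt else 0) +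
        runsSum (rest.dropWhile (fun x => x == c))
termination_by l => l.length
decreasing_by
  simp only [List.length_cons]
  exact Nat.lt_succ_of_le (List.length_dropWhile_le _ _)

def f_alt (number : Int) : Int :=
  runsSum (PySem.List.sorted (PySem.Int.toChars number) (fun x => x))

-- ===== PRECONDITION & SPEC =====
def Spec_f (number : Int) (out : Int) : Prop := out = f_alt number
instance (number : Int) (out : Int) : Decidable (Spec_f number out) := by unfold Spec_f; infer_instance

-- ===== CLAIM (what is proved, stated in full; the proofs are below) =====
def Claim_equal_f : Prop := ∀ (number : Int), Dom_f number → Spec_f number (f number)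

-- ===== LEMMAS AND PROOFS =====

-- int(c) for a single character, as both ports compute it
def pvVal (c : Char) : Int := (PySem.Int.ofChars? [c]).getD 0

-- per-occurrence form of the answer: each position x of l contributes int(x) iff x repeats in l
def pvS (l : List Char) : Int :=
  (l.map (fun x => if ((l.count x : Int)) > 1 then pvVal x else 0)).sum

-- A's dict-building loop is the Counter loop
lemma pvFoldA_eq_counter (l : List Char) :
    l.foldl (fun d i => if d.contains i then d.modify i 0 (fun v => v + 1) else d.insert i 1)
      PySem.Dict.empty = PySem.Dict.counter l := by
  rw [PySem.Dict.counter_eq_foldl]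
  apply PySem.List.foldl_congr_mem
  intro d i _
  by_cases h : d.contains i = true
  · simp [h]
  · simp only [Bool.not_eq_true] at h
    simp [h, PySem.Dict.modify, PySem.Dict.insert, PySem.Dict.getD_of_not_contains _ _ h]

-- A's value as a sum over the distinct characters
lemma pvA_eq_finsetSum (l : List Char) :
    ((l.foldl (fun d i => if d.contains i then d.modify i 0 (fun v => v + 1) else d.insert i 1)
        PySem.Dict.empty).items.foldl
        (fun suma kv => if kv.2 > 1 then suma + (PySem.Int.ofChars? [kv.1]).getD 0 * kv.2 else suma)
        0)
    = ∑ m ∈ l.toFinset, (if ((l.count m : Int)) > 1 then pvVal m * (l.count m : Int) else 0) := by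
  rw [pvFoldA_eq_counter, PySem.Dict.items_counter]
  have hstep : ∀ (suma : Int) (kv : Char × Int), kv ∈ (PySem.Set.ofList l).map (fun k => (k, (l.count k : Int))) →
      (if kv.2 > 1 then suma + (PySem.Int.ofChars? [kv.1]).getD 0 * kv.2 else suma)
      = suma + (if kv.2 > 1 then pvVal kv.1 * kv.2 else 0) := by
    intro suma kv _
    by_cases h : kv.2 > 1 <;> simp [h, pvVal]
  have hfold := PySem.List.foldl_congr_mem _
    (fun (suma : Int) (kv : Char × Int) => if kv.2 > 1 then suma + (PySem.Int.ofChars? [kv.1]).getD 0 * kv.2 else suma)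
    (fun (suma : Int) (kv : Char × Int) => suma + (if kv.2 > 1 then pvVal kv.1 * kv.2 else 0))
    (0 : Int) hstep
  rw [hfold, PySem.List.foldl_add]
  rw [List.map_map]
  have hnd := PySem.Set.nodup_ofList l
  rw [← List.sum_toFinset _ hnd]
  have hset : (PySem.Set.ofList l).toFinset = l.toFinset := by
    ext x
    simp [List.mem_toFinset, PySem.Set.mem_ofList]
  rw [hset]
  simp

-- the per-occurrence sum groups into the same Finset sum
lemma pvS_eq_finsetSum (l : List Char) :
    pvS l = ∑ m ∈ l.toFinset, (if ((l.count m : Int)) > 1 then pvVal m * (l.count m : Int) else 0) := by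
  unfold pvS
  rw [Finset.sum_list_map_count]
  apply Finset.sum_congr rfl
  intro m hm
  by_cases h : ((l.count m : Int)) > 1
  · simp only [h, if_pos]
    rw [nsmul_eq_mul]
    ring
  · simp [h]

-- pvS is invariant under permutation
lemma pvS_perm {l l' : List Char} (h : l.Perm l') : pvS l = pvS l' := by
  unfold pvS
  have hc : (fun x => if ((l.count x : Int)) > 1 then pvVal x else 0)
      = (fun x => if ((l'.count x : Int)) > 1 then pvVal x else 0) := by
    funext x
    rw [h.count_eq]
  rw [hc]
  exact (h.map _).sum_eq

-- every element of a run equals its head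
lemma pvRun_all_eq (c : Char) (rest : List Char) :
    ∀ x ∈ rest.takeWhile (fun x => x == c), x = c := by
  intro x hx
  simpa using List.mem_takeWhile_imp hx

-- the head character does not occur after its run in a sorted list
lemma pvNot_mem_drop (c : Char) (rest : List Char)
    (hp : (c :: rest).Pairwise (· ≤ ·)) :
    c ∉ rest.dropWhile (fun x => x == c) := by
  intro hmem
  have hne : rest.dropWhile (fun x => x == c) ≠ [] := List.ne_nil_of_mem hmem
  obtain ⟨d, t, ht⟩ := List.exists_cons_of_ne_nil hne
  have hhead : (rest.dropWhile (fun x => x == c)).head hne = d := by simp [ht]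
  have hdne : (d == c) = false := by
    have := List.head_dropWhile_not (fun x => x == c) hne
    rwa [hhead] at this
  have hdc : d ≠ c := by simpa using hdne
  have hsub : (rest.dropWhile (fun x => x == c)).Sublist rest := List.dropWhile_sublist _
  have hle : ∀ y ∈ rest, c ≤ y := (List.pairwise_cons.mp hp).1
  have hdm : d ∈ rest.dropWhile (fun x => x == c) := by rw [ht]; simp
  have hcd : c < d := lt_of_le_of_ne (hle _ (hsub.mem hdm)) (Ne.symm hdc)
  have hp' : (rest.dropWhile (fun x => x == c)).Pairwise (· ≤ ·) :=
    ((List.pairwise_cons.mp hp).2).sublist hsub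
  rw [ht] at hmem hp'
  rcases List.mem_cons.mp hmem with h | h
  · exact hdc h.symm
  · exact absurd ((List.pairwise_cons.mp hp').1 c h) (not_le.mpr hcd)

-- the main run-length invariant: on a sorted list, the run scan computes the per-occurrence sum
lemma pvRunsSum_eq_pvS : ∀ l : List Char, l.Pairwise (· ≤ ·) → runsSum l = pvS l := by
  intro l
  induction l using runsSum.induct with
  | case1 => intro _; simp [runsSum, pvS]
  | case2 c rest ih =>
    intro hp
    set run := rest.takeWhile (fun x => x == c) with hrun
    set rest' := rest.dropWhile (fun x => x == c) with hrest'
    have hsplit : rest = run ++ rest' := (List.takeWhile_append_dropWhile).symm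
    have hall := pvRun_all_eq c rest
    rw [← hrun] at hall
    have hnot := pvNot_mem_drop c rest hp
    rw [← hrest'] at hnot
    have hp' : rest'.Pairwise (· ≤ ·) :=
      ((List.pairwise_cons.mp hp).2).sublist (List.dropWhile_sublist _)
    -- counts
    have hcount_c : (c :: rest).count c = run.length + 1 := by
      rw [hsplit]
      simp only [List.count_cons, List.count_append]
      rw [List.count_eq_zero.mpr hnot]
      have : run.count c = run.length := by
        rw [List.count_eq_length]
        intro b hb; exact (hall b hb).symm
      simp [this]
    have hcount_ne : ∀ x, x ≠ c → (c :: rest).count x = rest'.count x := by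
      intro x hx
      rw [hsplit]
      simp only [List.count_cons, List.count_append]
      have hrun0 : run.count x = 0 := by
        rw [List.count_eq_zero]
        intro hmem; exact hx (hall x hmem)
      simp [hrun0, Ne.symm hx]
    -- unfold one step of runsSum
    have hSL : pvS (c :: rest) =
        (if (((c :: rest).count c : Int)) > 1 then pvVal c else 0) * ((run.length : Int) + 1)
        + pvS rest' := by
      unfold pvS
      conv_lhs => rw [hsplit]
      simp only [List.map_cons, List.map_append, List.sum_cons, List.sum_append]
      have hmapc : ∀ x ∈ run,
          (if ((((c :: (run ++ rest')).count x : Int))) > 1 then pvVal x else 0)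
          = (if ((((c :: (run ++ rest')).count c : Int))) > 1 then pvVal c else 0) := by
        intro x hx; rw [hall x hx]
      rw [List.map_congr_left hmapc, PySem.List.sum_map_const_int]
      have hmapr : ∀ x ∈ rest',
          (if ((((c :: (run ++ rest')).count x : Int))) > 1 then pvVal x else 0)
          = (if (((rest'.count x : Int))) > 1 then pvVal x else 0) := by
        intro x hx
        have hx' : x ≠ c := fun h => hnot (h ▸ hx)
        rw [← hsplit, hcount_ne x hx']
      rw [List.map_congr_left hmapr]
      rw [← hsplit]
      ring
    have hcast : (((run.length + 1 : Nat) : Int)) = (run.length : Int) + 1 := by push_cast; ring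
    simp only [runsSum]
    rw [← hrun, ← hrest', ih hp', hSL, hcount_c, hcast]
    simp only [pvVal]
    split_ifs with h1 <;> ring

-- ===== VERDICT (by name: the statement is the Claim_ definition above) =====
theorem f_spec : Claim_equal_f := by
  intro number _
  unfold Spec_f
  simp only [f, f_alt]
  rw [pvA_eq_finsetSum, ← pvS_eq_finsetSum]
  rw [pvRunsSum_eq_pvS _ (by simpa using PySem.List.sorted_pairwise (PySem.Int.toChars number) (fun x => x))]
  exact (pvS_perm (PySem.List.sorted_perm (PySem.Int.toChars number) (fun x => x) false)).symm
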